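-- pv_equiv track=rewrite | github.com/junho85/ps-python | google-code-jam/2020/01.Qualification Round/2_nesting_depth_5pts.py | solve
-- ===== SOURCE A (Python) =====
-- def solve(s):
--     result = ""
--     is_open = False
--     for c in s:
--         if c == '0':
--             if is_open:
--                 result += ')'
--                 is_open = False
--             result += c
--         else:
--             if not is_open:
--                 result += '('
--                 is_open = True
--             result += c
--     if is_open:
--         result += ')'
--
--     return result
-- ===== SOURCE B (Python) =====
-- def solve(s):
--     pieces = []
--     i = 0
--     n = len(s)
--     while i < n:
--         j = i + 1
--         if s[i] == '0':
--             while j < n and s[j] == '0':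
--                 j += 1
--             pieces.append(s[i:j])
--         else:
--             while j < n and s[j] != '0':
--                 j += 1
--             pieces.append('(' + s[i:j] + ')')
--         i = j
--     return ''.join(pieces)
-- ===== Notes on version B (the rewrite author's own statement) =====
-- stated objective: alternative
-- what changed: B splits the string into maximal runs of '0'/non-'0' characters and joins each run (wrapping non-zero runs in one paren pair), instead of A's per-character state machine with an is_open flag.
import Mathlib
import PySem

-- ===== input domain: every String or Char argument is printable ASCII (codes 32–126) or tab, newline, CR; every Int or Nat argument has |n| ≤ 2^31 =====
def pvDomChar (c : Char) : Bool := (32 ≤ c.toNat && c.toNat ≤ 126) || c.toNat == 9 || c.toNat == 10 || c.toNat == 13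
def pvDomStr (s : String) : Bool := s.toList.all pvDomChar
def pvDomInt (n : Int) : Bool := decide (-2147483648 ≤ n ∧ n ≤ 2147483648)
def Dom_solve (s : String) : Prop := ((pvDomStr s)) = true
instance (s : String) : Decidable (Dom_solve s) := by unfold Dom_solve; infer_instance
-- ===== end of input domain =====

-- B wraps maximal non-'0' runs in one paren pair (run splitting + join) instead of A's per-character is_open state machine; alternative decomposition, same result.

-- ===== PORT A =====
-- A: per-character loop carrying (result, is_open); the result string is kept as a List Char.
def solve (s : String) : String :=
  let st := s.toList.foldl (fun (acc : List Char × Bool) c =>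
    if c = '0' then
      (if acc.2 then (acc.1 ++ [')', c], false) else (acc.1 ++ [c], false))
    else
      (if acc.2 then (acc.1 ++ [c], true) else (acc.1 ++ ['(', c], true)))
    ([], false)
  String.mk (if st.2 then st.1 ++ [')'] else st.1)

-- ===== PORT B =====
-- B: split into maximal runs (takeWhile/dropWhile on 'same zero-ness as the run head'), wrap non-zero runs, join.
def runPieces (cs : List Char) : List (List Char) :=
  match cs with
  | [] => []
  | c :: rest =>
    let p := fun x => (x == '0') == (c == '0')
    (if c = '0' then c :: rest.takeWhile p else '(' :: c :: rest.takeWhile p ++ [')'])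
      :: runPieces (rest.dropWhile p)
termination_by cs.length
decreasing_by
  simp only [List.length_cons]
  exact Nat.lt_succ_of_le (List.length_dropWhile_le _ _)

def solve_alt (s : String) : String := String.mk (runPieces s.toList).flatten

-- ===== PRECONDITION & SPEC =====
def Spec_solve (s : String) (out : String) : Prop := out = solve_alt s
instance (s : String) (out : String) : Decidable (Spec_solve s out) := by unfold Spec_solve; infer_instance

-- ===== CLAIM (what is proved, stated in full; the proofs are below) =====
def Claim_equal_solve : Prop := ∀ (s : String), Dom_solve s → Spec_solve s (solve s)

-- ===== LEMMAS AND PROOFS =====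

-- what A's loop emits from flag state b onwards (including the final close paren)
def emit : Bool → List Char → List Char
  | b, [] => if b then [')'] else []
  | b, c :: cs =>
      if c = '0' then (if b then [')', c] else [c]) ++ emit false cs
      else (if b then [c] else ['(', c]) ++ emit true cs

def stepA (acc : List Char × Bool) (c : Char) : List Char × Bool :=
  if c = '0' then
    (if acc.2 then (acc.1 ++ [')', c], false) else (acc.1 ++ [c], false))
  else
    (if acc.2 then (acc.1 ++ [c], true) else (acc.1 ++ ['(', c], true))

theorem foldA_emit (cs : List Char) : ∀ (r : List Char) (b : Bool),
    (if (cs.foldl stepA (r, b)).2 then (cs.foldl stepA (r, b)).1 ++ [')']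
     else (cs.foldl stepA (r, b)).1) = r ++ emit b cs := by
  induction cs with
  | nil => intro r b; cases b <;> simp [emit]
  | cons c cs ih =>
    intro r b
    by_cases h : c = '0' <;> cases b <;>
      simp [stepA, emit, h, ih, List.append_assoc]

theorem emit_false_zeros (xs : List Char) (ys : List Char)
    (h : ∀ x ∈ xs, x = '0') : emit false (xs ++ ys) = xs ++ emit false ys := by
  induction xs with
  | nil => rfl
  | cons x xs ih =>
    have hx : x = '0' := h x (List.mem_cons_self ..)
    simp [emit, hx, ih (fun a ha => h a (List.mem_cons_of_mem _ ha))]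

theorem emit_true_nonzeros (xs : List Char) (ys : List Char)
    (h : ∀ x ∈ xs, x ≠ '0') : emit true (xs ++ ys) = xs ++ emit true ys := by
  induction xs with
  | nil => rfl
  | cons x xs ih =>
    have hx : x ≠ '0' := h x (List.mem_cons_self ..)
    simp [emit, hx, ih (fun a ha => h a (List.mem_cons_of_mem _ ha))]

theorem emit_true_close (ys : List Char)
    (h : ∀ y ∈ ys.head?, y = '0') : emit true ys = ')' :: emit false ys := by
  cases ys with
  | nil => rfl
  | cons y ys =>
    have hy : y = '0' := h y rfl
    simp [emit, hy]

theorem runPieces_emit (cs : List Char) :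
    (runPieces cs).flatten = emit false cs := by
  induction cs using runPieces.induct with
  | case1 => simp [runPieces, emit]
  | case2 c rest p ih =>
    have hsplit : rest.takeWhile p ++ rest.dropWhile p = rest :=
      List.takeWhile_append_dropWhile (p := p) (l := rest)
    rw [runPieces, List.flatten_cons, ih]
    by_cases h : c = '0'
    · have htk : ∀ x ∈ rest.takeWhile p, x = '0' := by
        intro x hx
        have hpx := List.mem_takeWhile_imp hx
        simpa [p, h] using hpx
      have e1 : emit false (c :: (rest.takeWhile p ++ rest.dropWhile p))
          = c :: emit false (rest.takeWhile p ++ rest.dropWhile p) := by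
        simp [emit, h]
      conv_rhs => rw [← hsplit]
      rw [if_pos h, e1, emit_false_zeros _ _ htk]
      simp
      rfl
    · have htk : ∀ x ∈ rest.takeWhile p, x ≠ '0' := by
        intro x hx
        have hpx := List.mem_takeWhile_imp hx
        simpa [p, h] using hpx
      have hdw : ∀ y ∈ (rest.dropWhile p).head?, y = '0' := by
        intro y hy
        have hnot := List.head?_dropWhile_not p rest
        cases hh : (rest.dropWhile p).head? with
        | none => simp [hh] at hy
        | some z =>
          rw [hh] at hnot
          have hz : y = z := by
            have := hy; rw [hh] at this; simpa using this.symm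
          subst hz
          simpa [p, h] using hnot
      have e1 : emit false (c :: (rest.takeWhile p ++ rest.dropWhile p))
          = '(' :: c :: emit true (rest.takeWhile p ++ rest.dropWhile p) := by
        simp [emit, h]
      conv_rhs => rw [← hsplit]
      rw [if_neg h, e1, emit_true_nonzeros _ _ htk, emit_true_close _ hdw]
      simp
      rfl

-- ===== VERDICT (by name: the statement is the Claim_ definition above) =====
theorem solve_spec : Claim_equal_solve := by
  intro s _
  show solve s = solve_alt s
  unfold solve solve_alt
  rw [runPieces_emit]
  exact congrArg String.mk (foldA_emit s.toList [] false)
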